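-- pv_equiv track=rewrite | github.com/jhpark0323/Language-study | 04april/240404/동물원_1309.py | f
-- ===== SOURCE A (Python) =====
-- def f(n):
--     # 사자가 없을때, 1번에 있을 떄, 2번에 있을 때를 따로 계산 해줌
--     dp = [[0] * 3 for _ in range(n + 1)]
--     # 사자가 없을 때
--     dp[1][0] = 1
--     # 사자가 1번쨰 열에 있을 떄
--     dp[1][1] = 1
--     # 사자가 2번째 열에 있을 때
--     dp[1][2] = 1
--
--     for i in range(2, n + 1):
--         dp[i][0] = (dp[i-1][0] + dp[i-1][1] + dp[i-1][2]) % 9901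
--         dp[i][1] = (dp[i-1][0] + dp[i-1][2]) % 9901
--         dp[i][2] = (dp[i-1][0] + dp[i-1][1]) % 9901
--
--     return (dp[n][0] + dp[n][1] + dp[n][2]) % 9901
-- ===== SOURCE B (Python) =====
-- def f(n):
--     # Row totals of the 3-state DP satisfy the second-order recurrence
--     # s(k) = 2*s(k-1) + s(k-2) (mod 9901), with s(0) = 1, s(1) = 3.
--     # Keep only the last two totals instead of the whole (n+1) x 3 table.
--     a, b = 1, 3
--     for _ in range(n - 1):
--         a, b = b, (2 * b + a) % 9901
--     return b
-- ===== Notes on version B (the rewrite author's own statement) =====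
-- stated objective: faster
-- what changed: Replaces the (n+1)x3 DP table over three per-row states by the collapsed second-order recurrence s(k) = 2*s(k-1) + s(k-2) mod 9901 on row totals, keeping only the last two totals in O(1) space.
import Mathlib
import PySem

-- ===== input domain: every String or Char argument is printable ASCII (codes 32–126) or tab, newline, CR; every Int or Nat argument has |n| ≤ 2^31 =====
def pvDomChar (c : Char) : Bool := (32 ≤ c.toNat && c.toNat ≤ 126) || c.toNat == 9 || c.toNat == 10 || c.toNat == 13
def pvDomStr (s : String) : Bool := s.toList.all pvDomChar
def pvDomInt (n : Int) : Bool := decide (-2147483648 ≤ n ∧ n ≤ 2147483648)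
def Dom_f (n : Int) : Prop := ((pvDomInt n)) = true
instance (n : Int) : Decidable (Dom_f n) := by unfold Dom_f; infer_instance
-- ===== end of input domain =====

-- B replaces A's (n+1)x3 DP table by the collapsed recurrence s(k)=2*s(k-1)+s(k-2) mod 9901
-- on the row totals, keeping only the last two totals (constant-factor speedup, O(1) space).

-- ===== PORT A =====
-- Python's dp is an O(1)-indexed list, so it is ported as Array (List Int); getD/setIfInBounds
-- are exact for the nonnegative in-range indices that A uses on every input Pre_f admits
-- (outside that range Python raises IndexError, which Pre_f excludes).
-- dp[i][j]
def fGet (dp : Array (List Int)) (i : Int) (j : Int) : Int :=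
  PySem.List.pyGetD (dp.getD i.toNat []) j 0

-- dp[i][j] = v
def fSet (dp : Array (List Int)) (i : Int) (j : Int) (v : Int) : Array (List Int) :=
  dp.setIfInBounds i.toNat (PySem.List.pySetD (dp.getD i.toNat []) j v)

-- one iteration of A's for-loop (the three assignments, in order)
def fBody (dp : Array (List Int)) (i : Int) : Array (List Int) :=
  let dp := fSet dp i 0 (PySem.Int.mod (fGet dp (i-1) 0 + fGet dp (i-1) 1 + fGet dp (i-1) 2) 9901)
  let dp := fSet dp i 1 (PySem.Int.mod (fGet dp (i-1) 0 + fGet dp (i-1) 2) 9901)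
  let dp := fSet dp i 2 (PySem.Int.mod (fGet dp (i-1) 0 + fGet dp (i-1) 1) 9901)
  dp

def f (n : Int) : Int :=
  let dp := ((PySem.List.pyRange 0 (n+1) 1).map (fun _ => ([0,0,0] : List Int))).toArray
  let dp := fSet dp 1 0 1
  let dp := fSet dp 1 1 1
  let dp := fSet dp 1 2 1
  let dp := (PySem.List.pyRange 2 (n+1) 1).foldl fBody dp
  PySem.Int.mod (fGet dp n 0 + fGet dp n 1 + fGet dp n 2) 9901

-- ===== PORT B =====
def f_alt (n : Int) : Int :=
  let p := (PySem.List.pyRange 0 (n-1) 1).foldl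
    (fun (p : Int × Int) _ => (p.2, PySem.Int.mod (2 * p.2 + p.1) 9901)) (1, 3)
  p.2

-- ===== PRECONDITION & SPEC =====
-- A indexes dp[1] into a list of length n+1, so it raises IndexError for every n ≤ 0.
def Pre_f (n : Int) : Prop := 1 ≤ n
instance (n : Int) : Decidable (Pre_f n) := by unfold Pre_f; infer_instance
def pvWitness_f : Int := 3

def Spec_f (n : Int) (out : Int) : Prop := out = f_alt n
instance (n : Int) (out : Int) : Decidable (Spec_f n out) := by unfold Spec_f; infer_instance

-- ===== CLAIM (what is proved, stated in full; the proofs are below) =====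
def Claim_equal_f : Prop := ∀ (n : Int), Dom_f n → Pre_f n → Spec_f n (f n)

-- ===== LEMMAS AND PROOFS =====

-- B's pair of consecutive row totals after k iterations
def sQ : Nat → Int × Int
  | 0 => (1, 3)
  | k+1 => ((sQ k).2, (2 * (sQ k).2 + (sQ k).1) % 9901)

-- A's row (k+1) of the table, as a triple
def rw3 : Nat → Int × Int × Int
  | 0 => (1, 1, 1)
  | k+1 => (((rw3 k).1 + (rw3 k).2.1 + (rw3 k).2.2) % 9901,
            ((rw3 k).1 + (rw3 k).2.2) % 9901, ((rw3 k).1 + (rw3 k).2.1) % 9901)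

theorem arr_getD (xs : List (List Int)) (i : Nat) : xs.toArray.getD i [] = xs.getD i [] := by
  rw [Array.getD_eq_getD_getElem?]
  simp [List.getD_eq_getElem?_getD]

-- the total of A's row k+1 is B's s(k+1), and its first entry carries s(k) mod 9901
theorem sQ_bridge (k : Nat) :
    ((rw3 k).1 + (rw3 k).2.1 + (rw3 k).2.2) % 9901 = (sQ k).2 ∧ (rw3 k).1 = (sQ k).1 % 9901 := by
  induction k with
  | zero => decide
  | succ k ih => simp only [rw3, sQ]; omega

theorem falt_fold (k : Nat) :
    (PySem.List.pyRange 0 (k : Int) 1).foldl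
      (fun (p : Int × Int) _ => (p.2, PySem.Int.mod (2 * p.2 + p.1) 9901)) (1, 3) = sQ k := by
  induction k with
  | zero => decide
  | succ k ih =>
    have h : ((k+1 : Nat) : Int) = (k : Int) + 1 := by push_cast; ring
    rw [h, PySem.List.pyRange_one_succ_right (by positivity), List.foldl_append, ih]
    simp [sQ]

theorem fBody_spec (dp : List (List Int)) (a : Nat) (x y z : Int)
    (ha2 : 2 ≤ a) (halen : a < dp.length)
    (hprev : dp.getD (a-1) [] = [x, y, z]) (hcur : dp.getD a [] = [0, 0, 0]) :
    fBody dp.toArray (a : Int) = (dp.set a [(x+y+z) % 9901, (x+z) % 9901, (x+y) % 9901]).toArray := by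
  have h1 : ((a : Int) - 1).toNat = a - 1 := by omega
  have hget1 : ∀ v, (dp.set a v).getD (a-1) ([] : List Int) = [x, y, z] := by
    intro v
    simp [List.getD_eq_getElem?_getD, List.getElem?_set_ne (by omega : a ≠ a - 1)]
    simpa [List.getD_eq_getElem?_getD] using hprev
  have hget2 : ∀ v, (dp.set a v).getD a ([] : List Int) = v := by
    intro v
    simp [List.getD_eq_getElem?_getD, halen]
  simp only [fBody, fSet, fGet, h1, Int.toNat_natCast, List.setIfInBounds_toArray, arr_getD,
    hprev, hcur, hget1, hget2, List.set_set]
  simp [pysem]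

theorem loopInv (len : Nat) : ∀ (a : Nat) (dp : List (List Int)), 2 ≤ a → a + len ≤ dp.length →
    dp.getD (a-1) [] = [(rw3 (a-2)).1, (rw3 (a-2)).2.1, (rw3 (a-2)).2.2] →
    (∀ j : Nat, a ≤ j → j < dp.length → dp.getD j [] = [0, 0, 0]) →
    ((PySem.List.pyRange (a : Int) ((a : Int) + (len : Int)) 1).foldl fBody dp.toArray).getD (a+len-1) []
      = [(rw3 (a+len-2)).1, (rw3 (a+len-2)).2.1, (rw3 (a+len-2)).2.2] := by
  induction len with
  | zero =>
    intro a dp ha2 hlen hprev h0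
    simpa [PySem.List.pyRange_one_eq_nil (by omega : (a:Int) + (0:Nat) ≤ a), arr_getD] using hprev
  | succ len ih =>
    intro a dp ha2 hlen hprev h0
    rw [PySem.List.pyRange_one_cons (by push_cast; omega : (a:Int) < (a:Int) + ((len+1 : Nat) : Int)),
        List.foldl_cons]
    rw [fBody_spec dp a _ _ _ ha2 (by omega) hprev (h0 a (le_refl a) (by omega))]
    have hstep : ((dp.set a [((rw3 (a-2)).1 + (rw3 (a-2)).2.1 + (rw3 (a-2)).2.2) % 9901,
        ((rw3 (a-2)).1 + (rw3 (a-2)).2.2) % 9901, ((rw3 (a-2)).1 + (rw3 (a-2)).2.1) % 9901]) :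
        List (List Int)).getD ((a+1)-1) [] =
        [(rw3 ((a+1)-2)).1, (rw3 ((a+1)-2)).2.1, (rw3 ((a+1)-2)).2.2] := by
      have e : (a+1)-2 = (a-2)+1 := by omega
      simp [List.getD_eq_getElem?_getD, (by omega : a < dp.length), e, rw3]
    have harg : ((a : Int) + 1) = ((a+1 : Nat) : Int) := by push_cast; ring
    have hub : (a : Int) + ((len+1 : Nat) : Int) = ((a+1 : Nat) : Int) + (len : Nat) := by
      push_cast; ring
    rw [harg, hub]
    have := ih (a+1) (dp.set a [((rw3 (a-2)).1 + (rw3 (a-2)).2.1 + (rw3 (a-2)).2.2) % 9901,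
        ((rw3 (a-2)).1 + (rw3 (a-2)).2.2) % 9901, ((rw3 (a-2)).1 + (rw3 (a-2)).2.1) % 9901])
      (by omega) (by simp; omega) hstep
      (by
        intro j hj hjlen
        rw [List.getD_eq_getElem?_getD, List.getElem?_set_ne (by omega : a ≠ j),
          ← List.getD_eq_getElem?_getD]
        exact h0 j (by omega) (by simpa using hjlen))
    have e1 : (a+1)+len-1 = a+(len+1)-1 := by omega
    have e2 : (a+1)+len-2 = a+(len+1)-2 := by omega
    rw [e1, e2] at this
    exact this

-- the three initial assignments dp[1][j] = 1 turn row 1 into [1,1,1]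
theorem init_spec (N : Nat) (h : 1 ≤ N) :
    fSet (fSet (fSet (List.replicate (N+1) [0,0,0]).toArray 1 0 1) 1 1 1) 1 2 1
      = ((List.replicate (N+1) ([0,0,0] : List Int)).set 1 [1,1,1]).toArray := by
  have hlt : 1 < N + 1 := by omega
  simp only [fSet, Int.toNat_one, List.setIfInBounds_toArray, arr_getD]
  norm_num [pysem, List.getD_eq_getElem?_getD, List.getElem?_replicate_of_lt hlt,
    List.getElem?_set_self, hlt, List.set_set]
  simp

-- ===== VERDICT (by name: the statement is the Claim_ definition above) =====
theorem f_spec : Claim_equal_f := by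
  intro n _ hn
  unfold Pre_f at hn
  unfold Spec_f
  obtain ⟨N, rfl⟩ : ∃ N : Nat, n = (N : Int) := ⟨n.toNat, by omega⟩
  have hN : 1 ≤ N := by exact_mod_cast hn
  have hlt : 1 < N + 1 := by omega
  -- initial table
  have hinit : ((PySem.List.pyRange 0 ((N : Int)+1) 1).map (fun _ => ([0,0,0] : List Int))).toArray
      = (List.replicate (N+1) ([0,0,0] : List Int)).toArray := by
    rw [List.map_const']
    simp [PySem.List.length_pyRange_one]
  -- run the loop
  have hloop := loopInv (N-1) 2 ((List.replicate (N+1) ([0,0,0] : List Int)).set 1 [1,1,1])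
    (by omega)
    (by simp; omega)
    (by simp [List.getD_eq_getElem?_getD, hlt, rw3])
    (by
      intro j hj hjlen
      rw [List.getD_eq_getElem?_getD, List.getElem?_set_ne (by omega : 1 ≠ j),
        List.getElem?_replicate_of_lt (by simpa using hjlen)]
      rfl)
  rw [show ((2:Nat):Int) + ((N-1 : Nat) : Int) = (N : Int) + 1 by omega,
      show (2:Nat) + (N-1) - 1 = N by omega, show (2:Nat) + (N-1) - 2 = N - 1 by omega,
      show ((2:Nat):Int) = (2:Int) by norm_num] at hloop
  -- assemble both sides
  show PySem.Int.mod _ 9901 = _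
  rw [f_alt]
  rw [show (N : Int) - 1 = ((N-1 : Nat) : Int) by omega, falt_fold]
  simp only [hinit, init_spec N hN]
  simp only [fGet, Int.toNat_natCast, hloop]
  have hb := sQ_bridge (N-1)
  rw [PySem.Int.mod_eq_emod_of_pos (by norm_num)]
  simp [pysem]
  omega
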